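-- pv_equiv track=rewrite | github.com/JMartynov/secret-scan | tools/ingest_gitleaks_rules.py | map_gitleaks_tags_to_category
-- ===== SOURCE A (Python) =====
-- def map_gitleaks_tags_to_category(tags):
--     tags_lower = [t.lower() for t in tags]
--     if 'key' in tags_lower or 'api' in tags_lower:
--         return 'api_keys'
--     if 'token' in tags_lower or 'auth' in tags_lower:
--         return 'tokens'
--     if 'cloud' in tags_lower or 'aws' in tags_lower or 'gcp' in tags_lower or 'azure' in tags_lower:
--         return 'cloud_credentials'
--     return 'api_keys' # default fallback
-- ===== SOURCE B (Python) =====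
-- _PRIORITY = {'key': 0, 'api': 0, 'token': 1, 'auth': 1,
--              'cloud': 2, 'aws': 2, 'gcp': 2, 'azure': 2}
-- _CATEGORIES = ['api_keys', 'tokens', 'cloud_credentials']
--
--
-- def map_gitleaks_tags_to_category(tags):
--     # Rank every tag by its keyword priority and take the best (lowest) rank;
--     # no recognised tag leaves the default rank 0 ('api_keys').
--     best = min((_PRIORITY[t] for t in map(str.lower, tags) if t in _PRIORITY),
--                default=0)
--     return _CATEGORIES[best]
-- ===== Notes on version B (the rewrite author's own statement) =====
-- stated objective: alternative
-- what changed: Instead of staged membership tests of keyword groups against the tag list, B ranks each tag once via a priority dictionary, takes the minimum rank over all tags (default 0), and indexes a category list with it.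
import Mathlib
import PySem

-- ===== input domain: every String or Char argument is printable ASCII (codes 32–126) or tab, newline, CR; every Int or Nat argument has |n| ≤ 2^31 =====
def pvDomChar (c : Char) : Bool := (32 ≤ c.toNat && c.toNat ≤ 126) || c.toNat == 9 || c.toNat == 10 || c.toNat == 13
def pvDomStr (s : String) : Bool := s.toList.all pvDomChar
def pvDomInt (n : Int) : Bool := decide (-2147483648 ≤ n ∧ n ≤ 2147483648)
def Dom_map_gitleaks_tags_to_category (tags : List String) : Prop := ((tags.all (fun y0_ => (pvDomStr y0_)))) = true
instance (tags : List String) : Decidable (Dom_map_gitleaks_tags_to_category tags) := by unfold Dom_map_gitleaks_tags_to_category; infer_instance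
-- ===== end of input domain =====

-- B ranks each tag once via a priority dictionary, takes the minimum rank
-- over all tags (default 0) and indexes a category list, replacing A's
-- staged keyword-group membership tests (objective: alternative).

-- ===== PORT A =====
def map_gitleaks_tags_to_category (tags : List String) : String :=
  let tags_lower := tags.map PySem.Str.lower
  if tags_lower.contains "key" || tags_lower.contains "api" then "api_keys"
  else if tags_lower.contains "token" || tags_lower.contains "auth" then "tokens"
  else if tags_lower.contains "cloud" || tags_lower.contains "aws" ||
          tags_lower.contains "gcp" || tags_lower.contains "azure" then "cloud_credentials"
  else "api_keys" -- default fallback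

-- ===== PORT B =====
-- the _PRIORITY dict of Source B
def pvPriority : PySem.Dict String Nat :=
  PySem.Dict.ofList [("key", 0), ("api", 0), ("token", 1), ("auth", 1),
                     ("cloud", 2), ("aws", 2), ("gcp", 2), ("azure", 2)]

-- the _CATEGORIES list of Source B
def pvCategories : List String := ["api_keys", "tokens", "cloud_credentials"]

def map_gitleaks_tags_to_category_alt (tags : List String) : String :=
  -- min(generator, default=0): minimum of the ranks of the recognised tags, 0 if none
  let best := ((PySem.List.min?
      (tags.filterMap (fun t => pvPriority.get? (PySem.Str.lower t)))
      (fun x => x)).getD 0)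
  -- _CATEGORIES[best]; best < 3 always, so the getD "" totality default is never used
  (PySem.List.pyGet? pvCategories (Int.ofNat best)).getD ""

-- ===== PRECONDITION & SPEC =====
def Spec_map_gitleaks_tags_to_category (tags : List String) (out : String) : Prop := out = map_gitleaks_tags_to_category_alt tags
instance (tags : List String) (out : String) : Decidable (Spec_map_gitleaks_tags_to_category tags out) := by unfold Spec_map_gitleaks_tags_to_category; infer_instance

-- ===== CLAIM (what is proved, stated in full; the proofs are below) =====
def Claim_equal_map_gitleaks_tags_to_category : Prop := ∀ (tags : List String), Dom_map_gitleaks_tags_to_category tags → Spec_map_gitleaks_tags_to_category tags (map_gitleaks_tags_to_category tags)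

-- ===== LEMMAS AND PROOFS =====

theorem pv_get?_priority (s : String) :
    pvPriority.get? s =
      if s = "key" ∨ s = "api" then some 0
      else if s = "token" ∨ s = "auth" then some 1
      else if s = "cloud" ∨ s = "aws" ∨ s = "gcp" ∨ s = "azure" then some 2
      else none := by
  have h : pvPriority = PySem.Dict.mk [("key", 0), ("api", 0), ("token", 1), ("auth", 1),
      ("cloud", 2), ("aws", 2), ("gcp", 2), ("azure", 2)] := by decide
  simp only [h, PySem.Dict.get?_mk_cons, beq_iff_eq]
  split_ifs <;> simp_all [PySem.Dict.get?] <;> tauto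

theorem pv_minD (L : List String) (M : List Nat)
    (hmem : ∀ n, n ∈ M ↔ ∃ s ∈ L, pvPriority.get? s = some n) :
    (PySem.List.min? M (fun x => x)).getD 0 =
      if "key" ∈ L ∨ "api" ∈ L then 0
      else if "token" ∈ L ∨ "auth" ∈ L then 1
      else if "cloud" ∈ L ∨ "aws" ∈ L ∨ "gcp" ∈ L ∨ "azure" ∈ L then 2
      else 0 := by
  have hchar : ∀ n, n ∈ M ↔
      (n = 0 ∧ ("key" ∈ L ∨ "api" ∈ L)) ∨ (n = 1 ∧ ("token" ∈ L ∨ "auth" ∈ L)) ∨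
      (n = 2 ∧ ("cloud" ∈ L ∨ "aws" ∈ L ∨ "gcp" ∈ L ∨ "azure" ∈ L)) := by
    intro n
    rw [hmem]
    constructor
    · rintro ⟨s, hs, hg⟩
      rw [pv_get?_priority] at hg
      split_ifs at hg with a b c
      · exact Or.inl ⟨(Option.some.inj hg).symm, by rcases a with rfl | rfl <;> tauto⟩
      · exact Or.inr (Or.inl ⟨(Option.some.inj hg).symm, by rcases b with rfl | rfl <;> tauto⟩)
      · exact Or.inr (Or.inr ⟨(Option.some.inj hg).symm,
          by rcases c with rfl | rfl | rfl | rfl <;> tauto⟩)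
    · rintro (⟨rfl, h | h⟩ | ⟨rfl, h | h⟩ | ⟨rfl, h | h | h | h⟩) <;>
        exact ⟨_, h, by decide⟩
  split_ifs with h0 h1 h2
  · have h0m : 0 ∈ M := (hchar 0).2 (Or.inl ⟨rfl, h0⟩)
    cases hm : PySem.List.min? M (fun x => x) with
    | none => rw [PySem.List.min?_eq_none_iff] at hm; simp [hm] at h0m
    | some m =>
      have := PySem.List.min?_isMin hm 0 h0m
      simp only [Option.getD_some]
      omega
  · have h1m : 1 ∈ M := (hchar 1).2 (Or.inr (Or.inl ⟨rfl, h1⟩))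
    cases hm : PySem.List.min? M (fun x => x) with
    | none => rw [PySem.List.min?_eq_none_iff] at hm; simp [hm] at h1m
    | some m =>
      have hle := PySem.List.min?_isMin hm 1 h1m
      have := (hchar m).1 (PySem.List.min?_mem hm)
      simp only [Option.getD_some]
      rcases this with ⟨rfl, h⟩ | ⟨rfl, _⟩ | ⟨rfl, _⟩ <;> first | omega | exact absurd h h0
  · have h2m : 2 ∈ M := (hchar 2).2 (Or.inr (Or.inr ⟨rfl, h2⟩))
    cases hm : PySem.List.min? M (fun x => x) with
    | none => rw [PySem.List.min?_eq_none_iff] at hm; simp [hm] at h2m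
    | some m =>
      have hle := PySem.List.min?_isMin hm 2 h2m
      have := (hchar m).1 (PySem.List.min?_mem hm)
      simp only [Option.getD_some]
      rcases this with ⟨rfl, h⟩ | ⟨rfl, h⟩ | ⟨rfl, _⟩ <;>
        first | omega | exact absurd h h0 | exact absurd h h1
  · have hnil : M = [] := by
      rw [List.eq_nil_iff_forall_not_mem]
      intro n hn
      rcases (hchar n).1 hn with ⟨_, h⟩ | ⟨_, h⟩ | ⟨_, h⟩ <;>
        first | exact h0 h | exact h1 h | exact h2 h
    rw [hnil]
    simp [PySem.List.min?]

-- rank-list membership ↔ some tag carries that rank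
theorem pv_mem_ranks (tags : List String) (n : Nat) :
    n ∈ tags.filterMap (fun t => pvPriority.get? (PySem.Str.lower t)) ↔
      ∃ s ∈ tags.map PySem.Str.lower, pvPriority.get? s = some n := by
  simp [List.mem_filterMap]

-- ===== VERDICT (by name: the statement is the Claim_ definition above) =====
theorem map_gitleaks_tags_to_category_spec : Claim_equal_map_gitleaks_tags_to_category := by
  intro tags _
  unfold Spec_map_gitleaks_tags_to_category map_gitleaks_tags_to_category
    map_gitleaks_tags_to_category_alt
  rw [pv_minD (tags.map PySem.Str.lower) _ (pv_mem_ranks tags)]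
  simp only [List.contains_eq_mem, Bool.or_eq_true, decide_eq_true_eq]
  split_ifs <;> first | rfl | tauto
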